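-- pv_equiv track=rewrite | github.com/hbot07/Competitive_Programming-Python | gauri10Sep2.py | getNumPairs
-- ===== SOURCE A (Python) =====
-- def getNumPairs(arr, queries):
--     n = len(arr)
--     maxima = arr[0]
--     minima = arr[n - 1]
--     pref_max = []
--     suf_min = []
--     for i in range(n):
--         if arr[i] > maxima:
--             maxima = arr[i]
--         pref_max.append(maxima)
--     for i in range(n - 1, -1, -1):
--         if arr[i] < minima:
--             minima = arr[i]
--         suf_min.append(minima)
--
--     answer = []
--     for q in queries:
--         counter = 0
--         for i in pref_max:
--             for j in suf_min:
--                 if i * j == q: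
--                     counter += 1
--         answer.append(counter)
--
--     return answer
-- ===== SOURCE B (Python) =====
-- def getNumPairs(arr, queries):
--     pref_max = []
--     m = None
--     for x in arr:
--         if m is None or x > m:
--             m = x
--         pref_max.append(m)
--     suf_min = []
--     m = None
--     for x in reversed(arr):
--         if m is None or x < m:
--             m = x
--         suf_min.append(m)
--     cnt = {}
--     for i in pref_max:
--         for j in suf_min:
--             p = i * j
--             cnt[p] = cnt.get(p, 0) + 1
--     return [cnt.get(q, 0) for q in queries]
-- ===== Notes on version B (the rewrite author's own statement) =====
-- stated objective: faster
-- what changed: B builds one hash-map counter of all prefix_max*suffix_min products in a single O(n^2) pass and answers each query by an O(1) lookup, instead of A's O(n^2) double scan repeated for every query.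
import Mathlib
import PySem

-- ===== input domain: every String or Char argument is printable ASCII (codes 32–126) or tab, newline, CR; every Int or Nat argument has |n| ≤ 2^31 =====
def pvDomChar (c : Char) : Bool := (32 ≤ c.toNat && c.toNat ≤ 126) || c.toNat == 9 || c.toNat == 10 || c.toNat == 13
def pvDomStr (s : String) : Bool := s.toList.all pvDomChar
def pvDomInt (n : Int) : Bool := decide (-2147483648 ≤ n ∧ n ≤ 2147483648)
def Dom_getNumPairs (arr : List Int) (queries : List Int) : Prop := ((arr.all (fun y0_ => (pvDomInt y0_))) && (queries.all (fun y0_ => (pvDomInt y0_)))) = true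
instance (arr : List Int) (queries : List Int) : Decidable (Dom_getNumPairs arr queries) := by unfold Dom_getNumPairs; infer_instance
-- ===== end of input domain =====

-- B replaces A's per-query O(n^2) double scan by a single counter of all prefix_max*suffix_min
-- products plus an O(1) lookup per query (equality of RETURN values proved on nonempty arr).

-- ===== PORT A =====
def getNumPairs (arr : List Int) (queries : List Int) : List Int :=
  let n := arr.length
  let maxima := PySem.List.pyGetD arr 0 0
  let minima := PySem.List.pyGetD arr ((n : Int) - 1) 0
  let pm := (PySem.List.pyRange 0 (n : Int) 1).foldl
      (fun (s : Int × List Int) i =>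
        let m := if PySem.List.pyGetD arr i 0 > s.1 then PySem.List.pyGetD arr i 0 else s.1
        (m, s.2 ++ [m])) (maxima, [])
  let pref_max := pm.2
  let sm := (PySem.List.pyRange ((n : Int) - 1) (-1) (-1)).foldl
      (fun (s : Int × List Int) i =>
        let m := if PySem.List.pyGetD arr i 0 < s.1 then PySem.List.pyGetD arr i 0 else s.1
        (m, s.2 ++ [m])) (minima, [])
  let suf_min := sm.2
  queries.foldl (fun ans q =>
    ans ++ [pref_max.foldl (fun c i =>
      suf_min.foldl (fun c j => if i * j == q then c + 1 else c) c) 0]) []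

-- ===== PORT B =====
-- running-extremum scan with an Option accumulator ('m = None' start), as in Source B
def bScan (cmp : Int → Int → Bool) (xs : List Int) : List Int :=
  (xs.foldl (fun (s : Option Int × List Int) x =>
    let m := match s.1 with
      | none => x
      | some m => if cmp x m then x else m
    (some m, s.2 ++ [m])) (none, [])).2

def getNumPairs_alt (arr : List Int) (queries : List Int) : List Int :=
  let pref_max := bScan (fun x m => x > m) arr
  let suf_min := bScan (fun x m => x < m) arr.reverse
  let cnt := pref_max.foldl (fun d i =>
    suf_min.foldl (fun d j =>
      d.insert (i * j) (d.getD (i * j) 0 + 1)) d) (PySem.Dict.empty (κ := Int) (ν := Int))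
  queries.map (fun q => cnt.getD q 0)

-- ===== PRECONDITION & SPEC =====
-- Pre_ excludes exactly the empty arr, on which A raises IndexError at arr[0].
def Pre_getNumPairs (arr : List Int) (queries : List Int) : Prop := arr ≠ []
instance (arr : List Int) (queries : List Int) : Decidable (Pre_getNumPairs arr queries) := by unfold Pre_getNumPairs; infer_instance
def pvWitness_getNumPairs : List Int × List Int := ([1, 3, 2], [6, 4])

def Spec_getNumPairs (arr : List Int) (queries : List Int) (out : List Int) : Prop := out = getNumPairs_alt arr queries
instance (arr : List Int) (queries : List Int) (out : List Int) : Decidable (Spec_getNumPairs arr queries out) := by unfold Spec_getNumPairs; infer_instance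

-- ===== CLAIM (what is proved, stated in full; the proofs are below) =====
def Claim_equal_getNumPairs : Prop := ∀ (arr : List Int) (queries : List Int), Dom_getNumPairs arr queries → Pre_getNumPairs arr queries → Spec_getNumPairs arr queries (getNumPairs arr queries)

-- ===== LEMMAS AND PROOFS =====

-- B's Option-state scan mirrors a plain-state fold once the first element has been consumed
theorem optFold_eq_plainFold (cmp : Int → Int → Bool) (xs : List Int) :
    ∀ (m : Int) (acc : List Int),
    xs.foldl (fun (s : Option Int × List Int) x =>
      let m := match s.1 with
        | none => x
        | some m => if cmp x m then x else m
      (some m, s.2 ++ [m])) (some m, acc)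
    = (some (xs.foldl (fun (s : Int × List Int) x =>
        let m := if cmp x s.1 then x else s.1
        (m, s.2 ++ [m])) (m, acc)).1,
       (xs.foldl (fun (s : Int × List Int) x =>
        let m := if cmp x s.1 then x else s.1
        (m, s.2 ++ [m])) (m, acc)).2) := by
  induction xs with
  | nil => intro m acc; rfl
  | cons x xs ih => intro m acc; simp only [List.foldl_cons]; exact ih _ _

theorem bScan_eq_plain (cmp : Int → Int → Bool) (x : Int) (xs : List Int) :
    bScan cmp (x :: xs) =
      ((x :: xs).foldl (fun (s : Int × List Int) y =>
        let m := if cmp y s.1 then y else s.1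
        (m, s.2 ++ [m])) (x, [])).2 := by
  simp only [bScan, List.foldl_cons, ite_self, List.nil_append]
  rw [optFold_eq_plainFold]

theorem foldl_foldl_flatMap {α β σ : Type} (l : List α) (g : α → List β) (f : σ → β → σ) :
    ∀ (init : σ), l.foldl (fun s a => (g a).foldl f s) init = (l.flatMap g).foldl f init := by
  induction l with
  | nil => intro init; rfl
  | cons a l ih => intro init; simp only [List.foldl_cons, List.flatMap_cons, List.foldl_append, ih]

-- A's per-query double count equals the count of q among all products
theorem double_count_eq (pref suf : List Int) (q : Int) :
    pref.foldl (fun c i => suf.foldl (fun c j => if i * j == q then c + 1 else c) c) 0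
    = (((pref.flatMap (fun i => suf.map (fun j => i * j))).count q : Nat) : Int) := by
  have h1 : ∀ (c : Int) (i : Int),
      suf.foldl (fun c j => if i * j == q then c + 1 else c) c
      = c + ((suf.countP (fun j => i * j == q) : Nat) : Int) := by
    intro c i; exact PySem.List.foldl_if_add_one (fun j => i * j == q) suf c
  calc pref.foldl (fun c i => suf.foldl (fun c j => if i * j == q then c + 1 else c) c) 0
      = pref.foldl (fun c i => c + ((suf.countP (fun j => i * j == q) : Nat) : Int)) 0 := by
        apply PySem.List.foldl_congr_mem; intro acc i _; exact h1 acc i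
    _ = 0 + (pref.map (fun i => ((suf.countP (fun j => i * j == q) : Nat) : Int))).sum := by
        rw [PySem.List.foldl_add]
    _ = (((pref.flatMap (fun i => suf.map (fun j => i * j))).count q : Nat) : Int) := by
        simp only [zero_add, List.count_flatMap,]
        rw [Nat.cast_list_sum, List.map_map]
        congr 1
        apply List.map_congr_left
        intro i _
        congr 1
        simp [List.count, List.countP_map, Function.comp_def]

-- B's nested insert loop is the Counter of the product list
theorem cnt_eq_counter (pref suf : List Int) :
    pref.foldl (fun d i =>
      suf.foldl (fun d j =>
        d.insert (i * j) (d.getD (i * j) 0 + 1)) d) (PySem.Dict.empty (κ := Int) (ν := Int))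
    = PySem.Dict.counter (pref.flatMap (fun i => suf.map (fun j => i * j))) := by
  have hinner : ∀ (d : PySem.Dict Int Int) (i : Int),
      suf.foldl (fun d j => d.insert (i * j) (d.getD (i * j) 0 + 1)) d
      = (suf.map (fun j => i * j)).foldl (fun d x => d.insert x (d.getD x 0 + 1)) d := by
    intro d i; rw [List.foldl_map]
  calc pref.foldl (fun d i =>
        suf.foldl (fun d j => d.insert (i * j) (d.getD (i * j) 0 + 1)) d)
        (PySem.Dict.empty (κ := Int) (ν := Int))
      = pref.foldl (fun d i =>
          (suf.map (fun j => i * j)).foldl (fun d x => d.insert x (d.getD x 0 + 1)) d)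
          (PySem.Dict.empty (κ := Int) (ν := Int)) := by
        apply PySem.List.foldl_congr_mem; intro d i _; exact hinner d i
    _ = (pref.flatMap (fun i => suf.map (fun j => i * j))).foldl
          (fun d x => d.insert x (d.getD x 0 + 1)) (PySem.Dict.empty (κ := Int) (ν := Int)) :=
        foldl_foldl_flatMap pref _ _ _
    _ = _ := PySem.Dict.foldl_insert_getD_add_one_eq_counter _

theorem portA_eq (a : Int) (rest : List Int) (queries : List Int) :
    getNumPairs (a :: rest) queries
    = queries.map (fun q =>
        (bScan (fun x m => x > m) (a :: rest)).foldl (fun c i =>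
          (bScan (fun x m => x < m) ((a :: rest).reverse)).foldl
            (fun c j => if i * j == q then c + 1 else c) c) 0) := by
  unfold getNumPairs
  simp only []
  -- the prefix-max loop over indices is the plain fold over the elements
  have hpref :
      (PySem.List.pyRange 0 (((a :: rest).length : Int)) 1).foldl
        (fun (s : Int × List Int) i =>
          let m := if PySem.List.pyGetD (a :: rest) i 0 > s.1 then PySem.List.pyGetD (a :: rest) i 0 else s.1
          (m, s.2 ++ [m])) (PySem.List.pyGetD (a :: rest) 0 0, [])
      = (a :: rest).foldl
          (fun (s : Int × List Int) y =>
            let m := if y > s.1 then y else s.1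
            (m, s.2 ++ [m])) (a, []) := by
    rw [PySem.List.pyGetD_zero_cons]
    exact PySem.List.foldl_pyRange_zero_pyGetD' (a :: rest) 0
      (fun (s : Int × List Int) (x : Int) =>
        let m := if x > s.1 then x else s.1
        (m, s.2 ++ [m])) (a, [])
  have hbmax : bScan (fun x m => x > m) (a :: rest)
      = ((a :: rest).foldl
          (fun (s : Int × List Int) y =>
            let m := if y > s.1 then y else s.1
            (m, s.2 ++ [m])) (a, [])).2 := by
    rw [bScan_eq_plain]; simp only [decide_eq_true_eq]
  obtain ⟨y, ts, hy⟩ : ∃ y ts, (a :: rest).reverse = y :: ts := by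
    rcases h : (a :: rest).reverse with _ | ⟨y, ts⟩
    · exact absurd h (by simp)
    · exact ⟨y, ts, rfl⟩
  have hx : (a :: rest) = ts.reverse ++ [y] := by
    rw [← List.reverse_reverse (a :: rest), hy]; simp
  have hminima : PySem.List.pyGetD (a :: rest) (((a :: rest).length : Int) - 1) 0 = y := by
    rw [hx]
    have hlen : ((ts.reverse ++ [y]).length : Int) - 1 = ((ts.length : Nat) : Int) := by
      simp
    rw [hlen, PySem.List.pyGetD_natCast]
    simp [List.getD]
  have hsuf :
      (PySem.List.pyRange (((a :: rest).length : Int) - 1) (-1) (-1)).foldl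
        (fun (s : Int × List Int) i =>
          let m := if PySem.List.pyGetD (a :: rest) i 0 < s.1 then PySem.List.pyGetD (a :: rest) i 0 else s.1
          (m, s.2 ++ [m]))
        (PySem.List.pyGetD (a :: rest) (((a :: rest).length : Int) - 1) 0, [])
      = (y :: ts).foldl
          (fun (s : Int × List Int) x =>
            let m := if x < s.1 then x else s.1
            (m, s.2 ++ [m])) (y, []) := by
    rw [hminima]
    have hr : PySem.List.pyRange (((a :: rest).length : Int) - 1) (-1) (-1)
        = (PySem.List.pyRange 0 (((a :: rest).length : Int)) 1).reverse := by
      rw [PySem.List.pyRange_neg_one_eq_reverse]; norm_num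
    rw [hr]
    have h2 := (List.foldl_map (f := fun (j : Int) => PySem.List.pyGetD (a :: rest) j 0)
      (g := fun (s : Int × List Int) (x : Int) =>
        let m := if x < s.1 then x else s.1
        (m, s.2 ++ [m]))
      (l := (PySem.List.pyRange 0 (((a :: rest).length : Int)) 1).reverse)
      (init := ((y : Int), ([] : List Int)))).symm
    rw [h2, List.map_reverse, PySem.List.map_pyGetD_pyRange_zero', hy]
  have hbmin : bScan (fun x m => x < m) ((a :: rest).reverse)
      = ((y :: ts).foldl
          (fun (s : Int × List Int) x =>
            let m := if x < s.1 then x else s.1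
            (m, s.2 ++ [m])) (y, [])).2 := by
    rw [hy, bScan_eq_plain]; simp only [decide_eq_true_eq]
  rw [hpref, hsuf, hbmax, hbmin]
  rw [PySem.List.foldl_append_singleton_eq_map]
  simp

-- ===== VERDICT (by name: the statement is the Claim_ definition above) =====
theorem getNumPairs_spec : Claim_equal_getNumPairs := by
  intro arr queries _ hpre
  obtain ⟨a, rest, rfl⟩ := List.exists_cons_of_ne_nil hpre
  unfold Spec_getNumPairs
  rw [portA_eq]
  unfold getNumPairs_alt
  simp only []
  rw [cnt_eq_counter]
  apply List.map_congr_left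
  intro q _
  rw [double_count_eq, PySem.Dict.getD_counter]
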